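-- pv_equiv track=rewrite | github.com/WillDng/IMACLIM-Country | src/data_mgmt.py | _aggregate_activities
-- ===== SOURCE A (Python) =====
-- from typing import (Dict, List, Tuple, Iterable, Union)
-- import collections
--
-- def _aggregate_activities(activities_mapping: Iterable[List[str]]) -> Dict[str, List[str]]:
--     read_mapping = collections.defaultdict(list)
--     for activity_description in activities_mapping:
--         activity, categories = activity_description[0], activity_description[1:]
--         for category in categories:
--             if activity not in read_mapping[category]:
--                 read_mapping[category].append(activity)
--             else:
--                 pass
--                 # FIXME should raise warning ?
--     return dict(read_mapping)
-- ===== SOURCE B (Python) =====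
-- import collections
--
-- def _aggregate_activities(activities_mapping):
--     # Phase 1: group every activity under each of its categories, duplicates allowed.
--     grouped = collections.defaultdict(list)
--     for activity_description in activities_mapping:
--         activity, categories = activity_description[0], activity_description[1:]
--         for category in categories:
--             grouped[category].append(activity)
--     # Phase 2: dedup each category's list, keeping first-occurrence order.
--     return {category: list(dict.fromkeys(acts)) for category, acts in grouped.items()}
-- ===== Notes on version B (the rewrite author's own statement) =====
-- stated objective: alternative
-- what changed: Replaces A's interleaved dedup (a membership scan of the category's accumulated list before every append) with a two-phase decomposition: phase 1 groups activities per category unconditionally allowing duplicates, phase 2 dedups each category's list once via dict.fromkeys preserving first-occurrence order.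
import Mathlib
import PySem

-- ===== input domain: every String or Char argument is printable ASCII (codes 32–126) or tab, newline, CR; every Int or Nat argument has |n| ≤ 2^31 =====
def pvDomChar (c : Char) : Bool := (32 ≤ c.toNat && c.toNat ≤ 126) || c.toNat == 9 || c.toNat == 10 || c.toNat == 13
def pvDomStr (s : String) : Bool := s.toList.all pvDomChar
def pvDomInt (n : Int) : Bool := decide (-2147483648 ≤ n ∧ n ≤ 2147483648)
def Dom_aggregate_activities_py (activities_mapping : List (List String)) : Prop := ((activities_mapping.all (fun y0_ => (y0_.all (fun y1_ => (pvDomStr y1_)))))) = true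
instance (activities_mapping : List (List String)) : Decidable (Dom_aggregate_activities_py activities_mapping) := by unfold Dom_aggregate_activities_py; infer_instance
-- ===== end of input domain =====

-- B replaces A's interleaved per-append membership scan by a two-phase decomposition:
-- first group with duplicates, then dedup each category's list once (objective: alternative).

-- ===== PORT A =====
-- A's loop: defaultdict access creates the key; append only if the activity is not yet listed.
def aggregate_activities_py (activities_mapping : List (List String)) : List (String × List String) :=
  (activities_mapping.foldl
    (fun read_mapping activity_description =>
      let activity := PySem.List.pyGetD activity_description 0 ""
      let categories := PySem.List.slice activity_description (some 1) none
      categories.foldl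
        (fun read_mapping category =>
          let cur := read_mapping.getD category []
          if activity ∈ cur then read_mapping.insert category cur
          else read_mapping.insert category (cur ++ [activity]))
        read_mapping)
    PySem.Dict.empty).items

-- ===== PORT B =====
-- B phase 1: append unconditionally (grouped[category].append(activity)); phase 2: dedup each list.
def aggregate_activities_py_alt (activities_mapping : List (List String)) : List (String × List String) :=
  let grouped :=
    activities_mapping.foldl
      (fun grouped activity_description =>
        let activity := PySem.List.pyGetD activity_description 0 ""
        (PySem.List.slice activity_description (some 1) none).foldl
          (fun grouped category =>
            PySem.Dict.modify grouped category [] (fun acts => acts ++ [activity]))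
          grouped)
      PySem.Dict.empty
  grouped.items.map (fun kv => (kv.1, PySem.List.dedup kv.2))

-- ===== PRECONDITION & SPEC =====
-- Pre_ excludes inputs containing an empty row: there A (and B) raise IndexError on activity_description[0].
def Pre_aggregate_activities_py (activities_mapping : List (List String)) : Prop :=
  ∀ row ∈ activities_mapping, row ≠ []
instance (activities_mapping : List (List String)) : Decidable (Pre_aggregate_activities_py activities_mapping) := by unfold Pre_aggregate_activities_py; infer_instance

def pvWitness_aggregate_activities_py : List (List String) :=
  [["act1", "cat1", "cat2"], ["act2", "cat1"], ["act1", "cat1"]]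

def Spec_aggregate_activities_py (activities_mapping : List (List String)) (out : List (String × List String)) : Prop := out = aggregate_activities_py_alt activities_mapping
instance (activities_mapping : List (List String)) (out : List (String × List String)) : Decidable (Spec_aggregate_activities_py activities_mapping out) := by unfold Spec_aggregate_activities_py; infer_instance

-- ===== CLAIM (what is proved, stated in full; the proofs are below) =====
def Claim_equal_aggregate_activities_py : Prop := ∀ (activities_mapping : List (List String)), Dom_aggregate_activities_py activities_mapping → Pre_aggregate_activities_py activities_mapping → Spec_aggregate_activities_py activities_mapping (aggregate_activities_py activities_mapping)

-- ===== LEMMAS AND PROOFS =====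

-- value-wise dedup of a dict: the bridge between A's dict and B's phase-1 dict
def pvMv (d : PySem.Dict String (List String)) : PySem.Dict String (List String) :=
  ⟨d.items.map (fun p => (p.1, PySem.List.dedup p.2))⟩

theorem pvGet?_mv (d : PySem.Dict String (List String)) (k : String) :
    (pvMv d).get? k = (d.get? k).map PySem.List.dedup := by
  simp only [pvMv, PySem.Dict.get?, List.find?_map]
  cases h : List.find? (fun p => p.1 == k) d.items <;>
    simp [Function.comp_def, h]

theorem pvContains_mv (d : PySem.Dict String (List String)) (k : String) :
    (pvMv d).contains k = d.contains k := by
  simp [pvMv, PySem.Dict.contains, List.any_map, Function.comp_def]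

theorem pvInsert_mv (d : PySem.Dict String (List String)) (k : String) (v : List String) :
    (pvMv d).insert k (PySem.List.dedup v) = pvMv (d.insert k v) := by
  unfold PySem.Dict.insert
  rw [pvContains_mv]
  split
  · simp only [pvMv, List.map_map]
    congr 1
    apply List.map_congr_left
    intro p _
    by_cases h : p.1 = k <;> simp [h]
  · simp [pvMv]

theorem pvDedup_append_singleton (v : List String) (a : String) :
    PySem.List.dedup (v ++ [a]) =
      if a ∈ v then PySem.List.dedup v else PySem.List.dedup v ++ [a] := by
  have h1 : PySem.List.dedup (v ++ [a]) = (PySem.Set.ofList v).add a := by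
    simp [PySem.List.dedup, PySem.Set.ofList_append_singleton]
  rw [h1]
  unfold PySem.Set.add
  by_cases hm : a ∈ v
  · have : PySem.Set.contains (PySem.Set.ofList v) a = true := by
      simp [PySem.Set.mem_ofList, hm]
    simp [hm, PySem.List.dedup]
  · have : PySem.Set.contains (PySem.Set.ofList v) a = false := by
      simp [PySem.Set.mem_ofList, hm]
    simp [hm, PySem.List.dedup]

-- one inner-loop step of A on the deduped dict equals dedup of one inner-loop step of B
theorem pvStep_mv (d : PySem.Dict String (List String)) (cat act : String) :
    (let cur := (pvMv d).getD cat []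
     if act ∈ cur then (pvMv d).insert cat cur
     else (pvMv d).insert cat (cur ++ [act]))
    = pvMv (PySem.Dict.modify d cat [] (fun acts => acts ++ [act])) := by
  simp only [PySem.Dict.modify, PySem.Dict.getD, pvGet?_mv]
  have hcur : ((d.get? cat).map PySem.List.dedup).getD [] =
      PySem.List.dedup ((d.get? cat).getD []) := by
    cases d.get? cat <;> simp [PySem.List.dedup, PySem.Set.ofList]
  rw [hcur]
  set v := (d.get? cat).getD [] with hv
  by_cases hm : act ∈ v
  · have hmem : act ∈ PySem.List.dedup v := by
      simp [PySem.List.dedup_eq_ofList, PySem.Set.mem_ofList, hm]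
    have hd : PySem.List.dedup v = PySem.List.dedup (v ++ [act]) := by
      rw [pvDedup_append_singleton]; simp [hm]
    simp only [hmem, if_pos]
    rw [hd, pvInsert_mv]
  · have hmem : act ∉ PySem.List.dedup v := by
      simp [PySem.List.dedup_eq_ofList, PySem.Set.mem_ofList, hm]
    have hd : PySem.List.dedup v ++ [act] = PySem.List.dedup (v ++ [act]) := by
      rw [pvDedup_append_singleton]; simp [hm]
    simp only [hmem, if_neg, not_false_iff]
    rw [hd, pvInsert_mv]

-- A's inner fold over the categories, started on the deduped dict, is dedup of B's
theorem pvInner_mv (cats : List String) (act : String)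
    (d : PySem.Dict String (List String)) :
    cats.foldl
      (fun read_mapping category =>
        let cur := read_mapping.getD category []
        if act ∈ cur then read_mapping.insert category cur
        else read_mapping.insert category (cur ++ [act]))
      (pvMv d)
    = pvMv (cats.foldl
        (fun grouped category =>
          PySem.Dict.modify grouped category [] (fun acts => acts ++ [act]))
        d) := by
  induction cats generalizing d with
  | nil => rfl
  | cons c cs ih =>
    simp only [List.foldl_cons]
    rw [pvStep_mv d c act, ih]

-- A's outer fold, started on the deduped dict, is dedup of B's outer fold
theorem pvOuter_mv (rows : List (List String)) (d : PySem.Dict String (List String)) :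
    rows.foldl
      (fun read_mapping activity_description =>
        let activity := PySem.List.pyGetD activity_description 0 ""
        let categories := PySem.List.slice activity_description (some 1) none
        categories.foldl
          (fun read_mapping category =>
            let cur := read_mapping.getD category []
            if activity ∈ cur then read_mapping.insert category cur
            else read_mapping.insert category (cur ++ [activity]))
          read_mapping)
      (pvMv d)
    = pvMv (rows.foldl
        (fun grouped activity_description =>
          let activity := PySem.List.pyGetD activity_description 0 ""
          (PySem.List.slice activity_description (some 1) none).foldl
            (fun grouped category =>
              PySem.Dict.modify grouped category [] (fun acts => acts ++ [activity]))
            grouped)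
        d) := by
  induction rows generalizing d with
  | nil => rfl
  | cons r rs ih =>
    simp only [List.foldl_cons]
    rw [pvInner_mv, ih]

-- ===== VERDICT (by name: the statement is the Claim_ definition above) =====
theorem aggregate_activities_py_spec : Claim_equal_aggregate_activities_py := by
  intro am _ _
  unfold Spec_aggregate_activities_py aggregate_activities_py aggregate_activities_py_alt
  have hempty : (PySem.Dict.empty : PySem.Dict String (List String)) =
      pvMv PySem.Dict.empty := rfl
  rw [hempty, pvOuter_mv]
  rfl
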